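-- pv_equiv track=rewrite | github.com/lucas-bertinchamp/Advent-of-Code | 2024/days/day15/day15.py | move_horizontal
-- ===== SOURCE A (Python) =====
-- def move_horizontal(grid, pos, next_pos):
--     vector = (next_pos[0] - pos[0], next_pos[1] - pos[1])
--     count = 0
--     to_move = []
--     next_pos = (next_pos[0], next_pos[1], grid[next_pos[0]][next_pos[1]])
--
--     # Count the number of rocks
--     while next_pos[2] == "[" or next_pos[2] == "]":
--         count += 1
--         to_move.append(next_pos)
--         next_pos = (next_pos[0] + vector[0], next_pos[1] + vector[1], grid[next_pos[0] + vector[0]][next_pos[1] + vector[1]])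
--
--     # Check if the next position is a wall and return the original grid
--     if grid[next_pos[0]][next_pos[1]] == "#":
--         return grid, pos
--
--     # If the next position is empty, move the rocks
--     elif grid[next_pos[0]][next_pos[1]] == ".":
--         for obj in to_move:
--             grid[obj[0]][obj[1]] = "."
--         for obj in to_move:
--             grid[obj[0] + vector[0]][obj[1] + vector[1]] = obj[2]
--         grid[pos[0]][pos[1]] = "."
--         new_pos = (pos[0] + vector[0], pos[1] + vector[1])
--         grid[new_pos[0]][new_pos[1]] = "@"
--
--         return grid, new_pos
-- ===== SOURCE B (Python) =====
-- def move_horizontal(grid, pos, next_pos):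
--     # In-place backward shift: scan forward to the first non-box cell, then
--     # copy each cell one step forward walking back, without building a to_move list.
--     dr = next_pos[0] - pos[0]
--     dc = next_pos[1] - pos[1]
--     r, c = next_pos
--     while grid[r][c] in ("[", "]"):
--         r += dr
--         c += dc
--     cell = grid[r][c]
--     if cell == "#":
--         return grid, pos
--     if cell == ".":
--         while (r, c) != next_pos:
--             grid[r][c] = grid[r - dr][c - dc]
--             r -= dr
--             c -= dc
--         grid[pos[0]][pos[1]] = "."
--         grid[next_pos[0]][next_pos[1]] = "@"
--         return grid, (next_pos[0], next_pos[1])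
-- ===== Notes on version B (the rewrite author's own statement) =====
-- stated objective: simpler
-- what changed: Instead of materializing a to_move list and rewriting it in two passes (clear all, then re-place all), B scans forward to the first non-box cell and then performs a single in-place backward shift, copying each cell one step forward while walking back to next_pos, using O(1) extra space.
import Mathlib
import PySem

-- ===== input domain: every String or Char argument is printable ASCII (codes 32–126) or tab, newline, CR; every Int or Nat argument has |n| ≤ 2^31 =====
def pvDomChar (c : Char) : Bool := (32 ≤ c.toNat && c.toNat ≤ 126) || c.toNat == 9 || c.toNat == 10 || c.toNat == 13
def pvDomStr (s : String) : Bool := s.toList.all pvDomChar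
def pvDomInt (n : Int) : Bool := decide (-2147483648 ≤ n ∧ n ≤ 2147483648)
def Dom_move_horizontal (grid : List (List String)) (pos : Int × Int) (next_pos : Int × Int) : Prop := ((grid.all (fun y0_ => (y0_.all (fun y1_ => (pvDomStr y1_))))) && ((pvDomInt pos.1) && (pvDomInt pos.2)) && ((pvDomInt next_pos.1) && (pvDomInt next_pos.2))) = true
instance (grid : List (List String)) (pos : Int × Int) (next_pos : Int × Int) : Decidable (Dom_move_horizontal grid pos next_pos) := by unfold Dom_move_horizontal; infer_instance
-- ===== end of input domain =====

-- B replaces A's to_move list and two rewrite passes by a single in-place backward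
-- shift (simpler, O(1) extra space). Python A/B mutate `grid` in place; the theorems
-- here are about the RETURNED value (grid, position) only.

-- shared Python-semantics helpers (used by both ports and by Pre_)

-- grid cell read `grid[r][c]` (none = IndexError), Python negative-index rule
def pvCell (g : List (List String)) (r c : Int) : Option String :=
  match PySem.List.pyGet? g r with
  | none => none
  | some row => PySem.List.pyGet? row c

-- grid cell write `grid[r][c] = v` (no-op where Python would raise; such inputs are outside Pre_)
def pvSet (g : List (List String)) (r c : Int) (v : String) : List (List String) :=
  match PySem.List.pyIdx? g.length r with
  | none => g
  | some i =>
    match g[i]? with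
    | none => g
    | some row => g.set i (PySem.List.pySetD row c v)

-- row-length profile of a grid, and the physical (normalized) coordinates of grid[r][c]
def pvShape (g : List (List String)) : List Nat := g.map List.length

def pvPhysS (sh : List Nat) (r c : Int) : Option (Nat × Nat) :=
  match PySem.List.pyIdx? sh.length r with
  | none => none
  | some i =>
    match sh[i]? with
    | none => none
    | some L => (PySem.List.pyIdx? L c).map (fun j => (i, j))

def pvPhys (g : List (List String)) (r c : Int) : Option (Nat × Nat) :=
  pvPhysS (pvShape g) r c

-- fuel bound: a terminating scan visits pairwise distinct index pairs, each with
-- row index in [-R,R) and column index in [-C,C); pvBound dominates their number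
def pvBound (g : List (List String)) : Nat :=
  4 * g.length * ((g.map List.length).foldr max 0) + 1

def pvFuel (g : List (List String)) : Nat := pvBound g + 1

-- ===== PORT A =====
-- the while loop of A: collects to_move (position and cell of each box), returns the
-- first non-box position; none = IndexError or out of fuel (both outside Pre_)
def scanA (g : List (List String)) (dr dc : Int) :
    Nat → Int → Int → Option ((Int × Int) × List (Int × (Int × String)))
  | 0, _, _ => none
  | fuel+1, r, c =>
    match pvCell g r c with
    | none => none
    | some s =>
      if s = "[" ∨ s = "]" then
        match scanA g dr dc fuel (r + dr) (c + dc) with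
        | none => none
        | some (p, l) => some (p, (r, (c, s)) :: l)
      else some ((r, c), [])

def move_horizontal (grid : List (List String)) (pos : Int × Int) (next_pos : Int × Int) : List (List String) × (Int × Int) :=
  let dr := next_pos.1 - pos.1
  let dc := next_pos.2 - pos.2
  match scanA grid dr dc (pvFuel grid) next_pos.1 next_pos.2 with
  | none => (grid, pos)          -- Python raises or loops forever here: outside Pre_
  | some (q, to_move) =>
    match pvCell grid q.1 q.2 with
    | none => (grid, pos)
    | some s =>
      if s = "#" then (grid, pos)
      else if s = "." then
        let g1 := to_move.foldl (fun g obj => pvSet g obj.1 obj.2.1 ".") grid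
        let g2 := to_move.foldl (fun g obj => pvSet g (obj.1 + dr) (obj.2.1 + dc) obj.2.2) g1
        let g3 := pvSet g2 pos.1 pos.2 "."
        let np := (pos.1 + dr, pos.2 + dc)
        let g4 := pvSet g3 np.1 np.2 "@"
        (g4, np)
      else (grid, pos)           -- Python returns None here: outside Pre_

-- ===== PORT B =====
-- B's forward scan: no to_move list, only the first non-box position
def scanB (g : List (List String)) (dr dc : Int) :
    Nat → Int → Int → Option (Int × Int)
  | 0, _, _ => none
  | fuel+1, r, c =>
    match pvCell g r c with
    | none => none
    | some s =>
      if s = "[" ∨ s = "]" then scanB g dr dc fuel (r + dr) (c + dc)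
      else some (r, c)

-- B's backward shift: walk from the empty cell back to next_pos, copying each cell forward
def shiftB (dr dc tr tc : Int) :
    Nat → List (List String) → Int → Int → List (List String)
  | 0, g, _, _ => g
  | fuel+1, g, r, c =>
    if r = tr ∧ c = tc then g
    else
      match pvCell g (r - dr) (c - dc) with
      | none => g                -- Python raises: outside Pre_
      | some w => shiftB dr dc tr tc fuel (pvSet g r c w) (r - dr) (c - dc)

def move_horizontal_alt (grid : List (List String)) (pos : Int × Int) (next_pos : Int × Int) : List (List String) × (Int × Int) :=
  let dr := next_pos.1 - pos.1
  let dc := next_pos.2 - pos.2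
  match scanB grid dr dc (pvFuel grid) next_pos.1 next_pos.2 with
  | none => (grid, pos)
  | some q =>
    match pvCell grid q.1 q.2 with
    | none => (grid, pos)
    | some s =>
      if s = "#" then (grid, pos)
      else if s = "." then
        let g1 := shiftB dr dc next_pos.1 next_pos.2 (pvFuel grid) grid q.1 q.2
        let g2 := pvSet g1 pos.1 pos.2 "."
        let g3 := pvSet g2 next_pos.1 next_pos.2 "@"
        (g3, (next_pos.1, next_pos.2))
      else (grid, pos)

-- ===== PRECONDITION & SPEC =====
-- Pre_ holds exactly when A returns a value of the declared type AND the scanned run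
-- has no two positions aliasing the same physical cell through Python's negative-index
-- wraparound: outside it A raises (IndexError / loops forever), returns the implicit
-- None, or — on the wraparound-alias inputs, which A does return on — A's two-pass
-- overwrite order produces an accidental value that neither program's reading of
-- "push the run of boxes" specifies (see cites in the claim).
def Pre_move_horizontal (grid : List (List String)) (pos : Int × Int) (next_pos : Int × Int) : Prop :=
  ∃ k : Nat, k ≤ pvBound grid ∧
    (∀ j : Nat, j < k →
      pvCell grid (next_pos.1 + (j : Int) * (next_pos.1 - pos.1)) (next_pos.2 + (j : Int) * (next_pos.2 - pos.2)) = some "[" ∨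
      pvCell grid (next_pos.1 + (j : Int) * (next_pos.1 - pos.1)) (next_pos.2 + (j : Int) * (next_pos.2 - pos.2)) = some "]") ∧
    (pvCell grid (next_pos.1 + (k : Int) * (next_pos.1 - pos.1)) (next_pos.2 + (k : Int) * (next_pos.2 - pos.2)) = some "#" ∨
      (pvCell grid (next_pos.1 + (k : Int) * (next_pos.1 - pos.1)) (next_pos.2 + (k : Int) * (next_pos.2 - pos.2)) = some "." ∧
       (pvPhys grid pos.1 pos.2).isSome = true)) ∧
    ((List.range (k+1)).map (fun j : Nat =>
      pvPhys grid (next_pos.1 + (j : Int) * (next_pos.1 - pos.1)) (next_pos.2 + (j : Int) * (next_pos.2 - pos.2)))).Nodup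

instance (grid : List (List String)) (pos : Int × Int) (next_pos : Int × Int) : Decidable (Pre_move_horizontal grid pos next_pos) := by unfold Pre_move_horizontal; infer_instance

def pvWitness_move_horizontal : List (List String) × (Int × Int) × (Int × Int) :=
  ([["@", "[", "."]], (0, 0), (0, 1))

def Spec_move_horizontal (grid : List (List String)) (pos : Int × Int) (next_pos : Int × Int) (out : List (List String) × (Int × Int)) : Prop := out = move_horizontal_alt grid pos next_pos
instance (grid : List (List String)) (pos : Int × Int) (next_pos : Int × Int) (out : List (List String) × (Int × Int)) : Decidable (Spec_move_horizontal grid pos next_pos out) := by unfold Spec_move_horizontal; infer_instance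

-- ===== CLAIM (what is proved, stated in full; the proofs are below) =====
def Claim_equal_move_horizontal : Prop := ∀ (grid : List (List String)) (pos : Int × Int) (next_pos : Int × Int), Dom_move_horizontal grid pos next_pos → Pre_move_horizontal grid pos next_pos → Spec_move_horizontal grid pos next_pos (move_horizontal grid pos next_pos)

-- ===== LEMMAS AND PROOFS =====

-- scan positions, their physical coordinates and cell values
def pvP (n1 n2 dr dc : Int) (j : Nat) : Int × Int := (n1 + (j : Int) * dr, n2 + (j : Int) * dc)

-- apply a list of writes; last-match lookup over a list of writes
def pvApply (g : List (List String)) (ws : List ((Int × Int) × String)) : List (List String) :=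
  ws.foldl (fun g w => pvSet g w.1.1 w.1.2 w.2) g

def pvFind (sh : List Nat) (τ : Option (Nat × Nat)) (base : Option String) (ws : List ((Int × Int) × String)) : Option String :=
  ws.foldl (fun acc w => if pvPhysS sh w.1.1 w.1.2 = τ ∧ τ.isSome then some w.2 else acc) base

theorem pvIdx_lt {n : Nat} {i : Int} {k : Nat} (h : PySem.List.pyIdx? n i = some k) : k < n := by
  unfold PySem.List.pyIdx? at h
  split_ifs at h <;> simp_all <;> omega

theorem pvCell_unfold (g : List (List String)) (r c : Int) : pvCell g r c =
    match PySem.List.pyIdx? g.length r with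
    | none => none
    | some i =>
      match g[i]? with
      | none => none
      | some row =>
        match PySem.List.pyIdx? row.length c with
        | none => none
        | some j => row[j]? := by
  unfold pvCell PySem.List.pyGet?
  cases PySem.List.pyIdx? g.length r with
  | none => rfl
  | some i =>
    cases hrow : g[i]? with
    | none => simp [hrow, Option.bind]
    | some row =>
      cases hc : PySem.List.pyIdx? row.length c with
      | none => simp [hrow, hc, Option.bind]
      | some j => simp [hrow, hc, Option.bind]

theorem pvPhys_unfold (g : List (List String)) (r c : Int) : pvPhys g r c =
    match PySem.List.pyIdx? g.length r with
    | none => none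
    | some i =>
      match g[i]? with
      | none => none
      | some row => (PySem.List.pyIdx? row.length c).map (fun j => (i, j)) := by
  unfold pvPhys pvPhysS pvShape
  simp only [List.length_map, List.getElem?_map]
  cases PySem.List.pyIdx? g.length r with
  | none => rfl
  | some i =>
    cases hrow : g[i]? with
    | none => simp [hrow]
    | some row => simp [hrow]

theorem pvShape_set (g : List (List String)) (r c : Int) (v : String) :
    pvShape (pvSet g r c v) = pvShape g := by
  unfold pvSet
  cases hidx : PySem.List.pyIdx? g.length r with
  | none => rfl
  | some i =>
    cases hrow : g[i]? with
    | none => simp [hrow]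
    | some row =>
      simp only [hrow]
      unfold pvShape
      apply List.ext_getElem?
      intro n
      simp only [List.getElem?_map, List.getElem?_set]
      by_cases hn : i = n
      · subst hn
        simp [pvIdx_lt hidx,
          (List.getElem?_eq_some_iff.mp hrow).2.symm]
      · simp [hn]

theorem pvCell_none_iff (g : List (List String)) (r c : Int) :
    pvCell g r c = none ↔ pvPhys g r c = none := by
  rw [pvCell_unfold, pvPhys_unfold]
  cases hidx : PySem.List.pyIdx? g.length r with
  | none => simp
  | some i =>
    cases hrow : g[i]? with
    | none => simp [hrow]
    | some row =>
      simp only [hrow]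
      cases hc : PySem.List.pyIdx? row.length c with
      | none => simp
      | some j =>
        have : j < row.length := pvIdx_lt hc
        simp [List.getElem?_eq_getElem this]

theorem pvList_set_self {α : Type} (l : List α) (i : Nat) (row : α) (h : l[i]? = some row) :
    l.set i row = l := by
  apply List.ext_getElem?
  intro n
  rw [List.getElem?_set]
  by_cases hn : i = n
  · subst hn
    have h1 := List.getElem?_eq_some_iff.mp h
    simp [h1.1, h1.2]
  · simp [hn]

theorem pvSetD_eq {α : Type} (row : List α) (b : Int) (v : α) (jb : Nat)
    (h : PySem.List.pyIdx? row.length b = some jb) :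
    PySem.List.pySetD row b v = row.set jb v := by
  unfold PySem.List.pySetD PySem.List.pySet?
  rw [h]; rfl

theorem pvSet_phys_none (g : List (List String)) (a b : Int) (v : String)
    (h : pvPhys g a b = none) : pvSet g a b v = g := by
  rw [pvPhys_unfold] at h
  unfold pvSet
  cases hidx : PySem.List.pyIdx? g.length a with
  | none => rfl
  | some i =>
    cases hrow : g[i]? with
    | none => simp [hrow]
    | some row =>
      simp only [hrow]
      cases hc : PySem.List.pyIdx? row.length b with
      | none =>
        unfold PySem.List.pySetD PySem.List.pySet?
        rw [hc]
        exact pvList_set_self g i row hrow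
      | some j => simp [hidx, hrow, hc] at h

theorem pvPhys_shape (g g' : List (List String)) (h : pvShape g' = pvShape g) (r c : Int) :
    pvPhys g' r c = pvPhys g r c := by
  unfold pvPhys
  rw [h]

theorem pvCell_set (g : List (List String)) (a b r c : Int) (v : String) :
    pvCell (pvSet g a b v) r c =
      if pvPhys g a b = pvPhys g r c ∧ (pvPhys g r c).isSome then some v
      else pvCell g r c := by
  cases hab : pvPhys g a b with
  | none =>
    rw [pvSet_phys_none g a b v hab]
    cases htc : pvPhys g r c with
    | none => simp
    | some q => simp [Option.isSome]
  | some qa =>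
    -- decode phys g a b
    rw [pvPhys_unfold] at hab
    cases hia : PySem.List.pyIdx? g.length a with
    | none => simp [hia] at hab
    | some ia =>
      cases hrowa : g[ia]? with
      | none => simp [hia, hrowa] at hab
      | some rowa =>
        cases hjb : PySem.List.pyIdx? rowa.length b with
        | none => simp [hia, hrowa, hjb] at hab
        | some jb =>
          simp only [hia, hrowa, hjb, Option.map_some] at hab
          obtain rfl : qa = (ia, jb) := by
            have := hab.symm
            injection this
          have hset : pvSet g a b v = g.set ia (rowa.set jb v) := by
            unfold pvSet
            simp only [hia, hrowa, pvSetD_eq rowa b v jb hjb]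
          cases htc : pvPhys g r c with
          | none =>
            have h1 : pvCell g r c = none := (pvCell_none_iff g r c).mpr htc
            have h2 : pvCell (pvSet g a b v) r c = none := by
              rw [pvCell_none_iff, pvPhys_shape g (pvSet g a b v) (pvShape_set g a b v), htc]
            simp [h1, h2]
          | some q =>
            obtain ⟨i, j⟩ := q
            -- decode phys g r c
            rw [pvPhys_unfold] at htc
            cases hir : PySem.List.pyIdx? g.length r with
            | none => simp [hir] at htc
            | some i' =>
              cases hrowr : g[i']? with
              | none => simp [hir, hrowr] at htc
              | some row =>
                cases hjc : PySem.List.pyIdx? row.length c with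
                | none => simp [hir, hrowr, hjc] at htc
                | some j' =>
                  simp only [hir, hrowr, hjc, Option.map_some, Option.some.injEq,
                    Prod.mk.injEq] at htc
                  obtain ⟨h1, h2⟩ := htc
                  rw [h1] at hir hrowr
                  rw [h2] at hjc
                  have hia_lt : ia < g.length := pvIdx_lt hia
                  have hj_lt : j < row.length := pvIdx_lt hjc
                  have hgr := (List.getElem?_eq_some_iff.mp hrowr).2
                  rw [pvCell_unfold, hset]
                  by_cases hii : ia = i
                  · subst hii
                    obtain rfl : rowa = row := by
                      rw [hrowa] at hrowr; injection hrowr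
                    by_cases hjj : jb = j
                    · subst hjj
                      simp [hir, hjc, List.length_set, hia_lt, hj_lt]
                    · simp [pvCell_unfold, hir, hjc, List.length_set, hia_lt, hjj,
                        Prod.ext_iff, hgr]
                  · simp [pvCell_unfold, hir, hrowr, hjc, List.length_set, hii,
                      Prod.ext_iff]

theorem pvShape_apply (g : List (List String)) (ws : List ((Int × Int) × String)) :
    pvShape (pvApply g ws) = pvShape g := by
  induction ws generalizing g with
  | nil => rfl
  | cons w t ih =>
    show pvShape (pvApply (pvSet g w.1.1 w.1.2 w.2) t) = pvShape g
    rw [ih, pvShape_set]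

theorem pvCell_apply (g : List (List String)) (ws : List ((Int × Int) × String)) (r c : Int) :
    pvCell (pvApply g ws) r c = pvFind (pvShape g) (pvPhys g r c) (pvCell g r c) ws := by
  induction ws generalizing g with
  | nil => rfl
  | cons w t ih =>
    show pvCell (pvApply (pvSet g w.1.1 w.1.2 w.2) t) r c = _
    rw [ih (pvSet g w.1.1 w.1.2 w.2),
      pvShape_set g w.1.1 w.1.2 w.2,
      pvPhys_shape g (pvSet g w.1.1 w.1.2 w.2) (pvShape_set g w.1.1 w.1.2 w.2),
      pvCell_set]
    simp only [pvFind, List.foldl_cons]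
    rfl

theorem pvFind_append (sh : List Nat) (τ : Option (Nat × Nat)) (base : Option String)
    (l1 l2 : List ((Int × Int) × String)) :
    pvFind sh τ base (l1 ++ l2) = pvFind sh τ (pvFind sh τ base l1) l2 := by
  unfold pvFind
  rw [List.foldl_append]

theorem pvFind_nomatch (sh : List Nat) (τ : Option (Nat × Nat)) (base : Option String)
    (l : List ((Int × Int) × String))
    (h : ∀ w ∈ l, ¬(pvPhysS sh w.1.1 w.1.2 = τ ∧ τ.isSome = true)) :
    pvFind sh τ base l = base := by
  induction l generalizing base with
  | nil => rfl
  | cons w t ih =>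
    show pvFind sh τ (if _ then _ else _) t = base
    rw [if_neg (h w (List.mem_cons_self))]
    exact ih base (fun w hw => h w (List.mem_cons_of_mem _ hw))

theorem pvFind_unique (sh : List Nat) (τ : Option (Nat × Nat)) (base : Option String)
    (l : List ((Int × Int) × String)) (val : String)
    (hex : ∃ w ∈ l, pvPhysS sh w.1.1 w.1.2 = τ ∧ τ.isSome = true)
    (hval : ∀ w ∈ l, (pvPhysS sh w.1.1 w.1.2 = τ ∧ τ.isSome = true) → w.2 = val) :
    pvFind sh τ base l = some val := by
  induction l generalizing base with
  | nil => simp at hex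
  | cons w t ih =>
    show pvFind sh τ (if _ then _ else _) t = some val
    by_cases hex' : ∃ w ∈ t, pvPhysS sh w.1.1 w.1.2 = τ ∧ τ.isSome = true
    · exact ih _ hex' (fun w hw => hval w (List.mem_cons_of_mem _ hw))
    · have hno : ∀ w ∈ t, ¬(pvPhysS sh w.1.1 w.1.2 = τ ∧ τ.isSome = true) := by
        intro w hw hcond
        exact hex' ⟨w, hw, hcond⟩
      rw [pvFind_nomatch sh τ _ t hno]
      obtain ⟨w', hw', hcond'⟩ := hex
      rcases List.mem_cons.mp hw' with rfl | hmem
      · rw [if_pos hcond', hval w' hw' hcond']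
      · exact absurd hcond' (hno w' hmem)

theorem pvIdx_natCast (n i : Nat) (h : i < n) : PySem.List.pyIdx? n (i : Int) = some i := by
  unfold PySem.List.pyIdx?
  have h0 : (0:Int) ≤ (i:Int) := by omega
  have h1 : (i:Int) < (n:Int) := by omega
  rw [if_pos h0, if_pos h1]
  simp

theorem pvGrid_ext (g h : List (List String))
    (hs : pvShape g = pvShape h)
    (hc : ∀ i j : Nat, pvCell g (i : Int) (j : Int) = pvCell h (i : Int) (j : Int)) :
    g = h := by
  have hlen : g.length = h.length := by
    have := congrArg List.length hs
    simpa [pvShape] using this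
  apply List.ext_getElem hlen
  intro i hi hih
  have hrow : g[i].length = h[i].length := by
    have := congrArg (fun l => l[i]?) hs
    simpa [pvShape, List.getElem?_eq_getElem, hi, hih] using this
  apply List.ext_getElem hrow
  intro j hj hjh
  have hcij := hc i j
  rw [pvCell_unfold, pvCell_unfold, pvIdx_natCast _ _ hi, pvIdx_natCast _ _ hih] at hcij
  simp only [List.getElem?_eq_getElem, hi, hih, pvIdx_natCast _ _ hj,
    pvIdx_natCast _ _ hjh] at hcij
  simpa [List.getElem?_eq_getElem, hj, hjh] using hcij

def pvV (g : List (List String)) (n1 n2 dr dc : Int) (j : Nat) : String :=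
  (pvCell g (n1 + (j : Int) * dr) (n2 + (j : Int) * dc)).getD ""

theorem scanA_spec (g : List (List String)) (n1 n2 dr dc : Int) (k : Nat)
    (hbox : ∀ j : Nat, j < k →
      pvCell g (n1 + (j : Int) * dr) (n2 + (j : Int) * dc) = some "[" ∨
      pvCell g (n1 + (j : Int) * dr) (n2 + (j : Int) * dc) = some "]")
    (hterm : pvCell g (n1 + (k : Int) * dr) (n2 + (k : Int) * dc) = some "#" ∨
      pvCell g (n1 + (k : Int) * dr) (n2 + (k : Int) * dc) = some ".") :
    ∀ m t : Nat, t + m = k → ∀ fuel : Nat, m < fuel →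
      scanA g dr dc fuel (n1 + (t : Int) * dr) (n2 + (t : Int) * dc) =
        some ((n1 + (k : Int) * dr, n2 + (k : Int) * dc),
          (List.range m).map (fun j =>
            (n1 + ((t + j : Nat) : Int) * dr,
             (n2 + ((t + j : Nat) : Int) * dc, pvV g n1 n2 dr dc (t + j))))) := by
  intro m
  induction m with
  | zero =>
    intro t ht fuel hfuel
    obtain rfl : t = k := by omega
    cases fuel with
    | zero => omega
    | succ f => rcases hterm with h | h <;> simp [scanA, h]
  | succ m ih =>
    intro t ht fuel hfuel
    cases fuel with
    | zero => omega
    | succ f =>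
      have htk : t < k := by omega
      have harg1 : n1 + (t : Int) * dr + dr = n1 + ((t + 1 : Nat) : Int) * dr := by
        push_cast; ring
      have harg2 : n2 + (t : Int) * dc + dc = n2 + ((t + 1 : Nat) : Int) * dc := by
        push_cast; ring
      have hrec := ih (t + 1) (by omega) f (by omega)
      have hidx : ∀ j : Nat, t + 1 + j = t + (j + 1) := by omega
      rcases hbox t htk with h | h <;>
      · simp only [scanA, h, harg1, harg2, hrec]
        simp [List.range_succ_eq_map, List.map_map, Function.comp_def, pvV, h, hidx]

theorem scanB_spec (g : List (List String)) (n1 n2 dr dc : Int) (k : Nat)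
    (hbox : ∀ j : Nat, j < k →
      pvCell g (n1 + (j : Int) * dr) (n2 + (j : Int) * dc) = some "[" ∨
      pvCell g (n1 + (j : Int) * dr) (n2 + (j : Int) * dc) = some "]")
    (hterm : pvCell g (n1 + (k : Int) * dr) (n2 + (k : Int) * dc) = some "#" ∨
      pvCell g (n1 + (k : Int) * dr) (n2 + (k : Int) * dc) = some ".") :
    ∀ m t : Nat, t + m = k → ∀ fuel : Nat, m < fuel →
      scanB g dr dc fuel (n1 + (t : Int) * dr) (n2 + (t : Int) * dc) =
        some (n1 + (k : Int) * dr, n2 + (k : Int) * dc) := by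
  intro m
  induction m with
  | zero =>
    intro t ht fuel hfuel
    obtain rfl : t = k := by omega
    cases fuel with
    | zero => omega
    | succ f => rcases hterm with h | h <;> simp [scanB, h]
  | succ m ih =>
    intro t ht fuel hfuel
    cases fuel with
    | zero => omega
    | succ f =>
      have htk : t < k := by omega
      have harg1 : n1 + (t : Int) * dr + dr = n1 + ((t + 1 : Nat) : Int) * dr := by
        push_cast; ring
      have harg2 : n2 + (t : Int) * dc + dc = n2 + ((t + 1 : Nat) : Int) * dc := by
        push_cast; ring
      have hrec := ih (t + 1) (by omega) f (by omega)
      rcases hbox t htk with h | h <;>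
      · simp only [scanB, h, harg1, harg2, hrec]
        simp

theorem shiftB_spec (g : List (List String)) (n1 n2 dr dc : Int) (k : Nat)
    (hboxV : ∀ j : Nat, j < k →
      pvCell g (n1 + (j : Int) * dr) (n2 + (j : Int) * dc) = some (pvV g n1 n2 dr dc j))
    (hnd : ∀ i j : Nat, i ≤ k → j ≤ k →
      pvPhys g (n1 + (i : Int) * dr) (n2 + (i : Int) * dc) =
        pvPhys g (n1 + (j : Int) * dr) (n2 + (j : Int) * dc) → i = j) :
    ∀ m : Nat, m ≤ k → ∀ fuel : Nat, m < fuel → ∀ g' : List (List String),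
      pvShape g' = pvShape g →
      (∀ j : Nat, j < m →
        pvCell g' (n1 + (j : Int) * dr) (n2 + (j : Int) * dc) =
          pvCell g (n1 + (j : Int) * dr) (n2 + (j : Int) * dc)) →
      shiftB dr dc n1 n2 fuel g' (n1 + (m : Int) * dr) (n2 + (m : Int) * dc) =
        pvApply g' ((List.range m).reverse.map (fun t =>
          ((n1 + ((t + 1 : Nat) : Int) * dr, n2 + ((t + 1 : Nat) : Int) * dc),
            pvV g n1 n2 dr dc t))) := by
  intro m
  induction m with
  | zero =>
    intro hm fuel hfuel g' hsh hcells
    cases fuel with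
    | zero => omega
    | succ f => simp [shiftB, pvApply]
  | succ m ih =>
    intro hm fuel hfuel g' hsh hcells
    cases fuel with
    | zero => omega
    | succ f =>
      have hguard : ¬(n1 + ((m + 1 : Nat) : Int) * dr = n1 ∧
          n2 + ((m + 1 : Nat) : Int) * dc = n2) := by
        rintro ⟨h1, h2⟩
        have : ((m + 1 : Nat) : Nat) = 0 := by
          apply hnd (m + 1) 0 (by omega) (by omega)
          rw [h1, h2]
          norm_num
        omega
      have harg1 : n1 + ((m + 1 : Nat) : Int) * dr - dr = n1 + (m : Int) * dr := by
        push_cast; ring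
      have harg2 : n2 + ((m + 1 : Nat) : Int) * dc - dc = n2 + (m : Int) * dc := by
        push_cast; ring
      have hread : pvCell g' (n1 + (m : Int) * dr) (n2 + (m : Int) * dc) =
          some (pvV g n1 n2 dr dc m) := by
        rw [hcells m (by omega), hboxV m (by omega)]
      have hstep : ∀ j : Nat, j < m →
          pvCell (pvSet g' (n1 + ((m + 1 : Nat) : Int) * dr)
              (n2 + ((m + 1 : Nat) : Int) * dc) (pvV g n1 n2 dr dc m))
            (n1 + (j : Int) * dr) (n2 + (j : Int) * dc) =
          pvCell g (n1 + (j : Int) * dr) (n2 + (j : Int) * dc) := by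
        intro j hj
        rw [pvCell_set]
        rw [if_neg]
        · exact hcells j (by omega)
        · rintro ⟨heq, -⟩
          rw [pvPhys_shape g g' hsh, pvPhys_shape g g' hsh] at heq
          have := hnd (m + 1) j (by omega) (by omega) heq
          omega
      have hrec := ih (by omega) f (by omega)
        (pvSet g' (n1 + ((m + 1 : Nat) : Int) * dr) (n2 + ((m + 1 : Nat) : Int) * dc)
          (pvV g n1 n2 dr dc m))
        (by rw [pvShape_set, hsh]) hstep
      simp only [shiftB, if_neg hguard, harg1, harg2, hread, hrec]
      rw [List.range_succ, List.reverse_append]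
      simp [pvApply]

theorem pvApply_append (g : List (List String)) (l1 l2 : List ((Int × Int) × String)) :
    pvApply g (l1 ++ l2) = pvApply (pvApply g l1) l2 := by
  unfold pvApply
  rw [List.foldl_append]

theorem pvFind_AB (sh : List Nat) (n1 n2 dr dc : Int) (v : Nat → String) (k : Nat)
    (hnd : ∀ i j : Nat, i ≤ k → j ≤ k →
      pvPhysS sh (n1 + (i : Int) * dr) (n2 + (i : Int) * dc) =
        pvPhysS sh (n1 + (j : Int) * dr) (n2 + (j : Int) * dc) → i = j)
    (τ : Option (Nat × Nat)) (base : Option String)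
    (hc0 : ¬(pvPhysS sh n1 n2 = τ ∧ τ.isSome = true)) :
    pvFind sh τ (pvFind sh τ base ((List.range k).map (fun j : Nat =>
        ((n1 + (j : Int) * dr, n2 + (j : Int) * dc), "."))))
      ((List.range k).map (fun j =>
        ((n1 + ((j + 1 : Nat) : Int) * dr, n2 + ((j + 1 : Nat) : Int) * dc), v j))) =
    pvFind sh τ base ((List.range k).reverse.map (fun t =>
        ((n1 + ((t + 1 : Nat) : Int) * dr, n2 + ((t + 1 : Nat) : Int) * dc), v t))) := by
  by_cases hm : ∃ t : Nat, t < k ∧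
      pvPhysS sh (n1 + ((t + 1 : Nat) : Int) * dr) (n2 + ((t + 1 : Nat) : Int) * dc) = τ ∧
      τ.isSome = true
  · obtain ⟨t, htk, hcond⟩ := hm
    have hval : ∀ w ∈ (List.range k).map (fun j =>
        ((n1 + ((j + 1 : Nat) : Int) * dr, n2 + ((j + 1 : Nat) : Int) * dc), v j)),
        (pvPhysS sh w.1.1 w.1.2 = τ ∧ τ.isSome = true) → w.2 = v t := by
      intro w hw hcw
      obtain ⟨j, hj, rfl⟩ := List.mem_map.mp hw
      dsimp only at hcw ⊢
      have hjk : j < k := List.mem_range.mp hj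
      have hj1 : j + 1 = t + 1 := by
        apply hnd (j + 1) (t + 1) (by omega) (by omega)
        rw [hcw.1, hcond.1]
      have hjt : j = t := by omega
      rw [hjt]
    have hmem : ∃ w ∈ (List.range k).map (fun j =>
        ((n1 + ((j + 1 : Nat) : Int) * dr, n2 + ((j + 1 : Nat) : Int) * dc), v j)),
        pvPhysS sh w.1.1 w.1.2 = τ ∧ τ.isSome = true := by
      refine ⟨((n1 + ((t + 1 : Nat) : Int) * dr, n2 + ((t + 1 : Nat) : Int) * dc), v t),
        List.mem_map.mpr ⟨t, List.mem_range.mpr htk, rfl⟩, ?_⟩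
      dsimp only
      exact hcond
    rw [pvFind_unique sh τ _ _ (v t) hmem hval]
    have hvalR : ∀ w ∈ (List.range k).reverse.map (fun t =>
        ((n1 + ((t + 1 : Nat) : Int) * dr, n2 + ((t + 1 : Nat) : Int) * dc), v t)),
        (pvPhysS sh w.1.1 w.1.2 = τ ∧ τ.isSome = true) → w.2 = v t := by
      intro w hw hcw
      obtain ⟨j, hj, rfl⟩ := List.mem_map.mp hw
      dsimp only at hcw ⊢
      have hjk : j < k := List.mem_range.mp (List.mem_reverse.mp hj)
      have hj1 : j + 1 = t + 1 := by
        apply hnd (j + 1) (t + 1) (by omega) (by omega)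
        rw [hcw.1, hcond.1]
      have hjt : j = t := by omega
      rw [hjt]
    have hmemR : ∃ w ∈ (List.range k).reverse.map (fun t =>
        ((n1 + ((t + 1 : Nat) : Int) * dr, n2 + ((t + 1 : Nat) : Int) * dc), v t)),
        pvPhysS sh w.1.1 w.1.2 = τ ∧ τ.isSome = true := by
      refine ⟨((n1 + ((t + 1 : Nat) : Int) * dr, n2 + ((t + 1 : Nat) : Int) * dc), v t),
        List.mem_map.mpr ⟨t, List.mem_reverse.mpr (List.mem_range.mpr htk), rfl⟩, ?_⟩
      dsimp only
      exact hcond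
    rw [pvFind_unique sh τ _ _ (v t) hmemR hvalR]
  · have hm' : ∀ t : Nat, t < k →
        ¬(pvPhysS sh (n1 + ((t + 1 : Nat) : Int) * dr) (n2 + ((t + 1 : Nat) : Int) * dc) = τ ∧
          τ.isSome = true) := by
      intro t htk hc
      exact hm ⟨t, htk, hc⟩
    have hnoM : ∀ w ∈ (List.range k).map (fun j =>
        ((n1 + ((j + 1 : Nat) : Int) * dr, n2 + ((j + 1 : Nat) : Int) * dc), v j)),
        ¬(pvPhysS sh w.1.1 w.1.2 = τ ∧ τ.isSome = true) := by
      intro w hw hcw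
      obtain ⟨j, hj, rfl⟩ := List.mem_map.mp hw
      dsimp only at hcw
      exact hm' j (List.mem_range.mp hj) hcw
    have hnoB : ∀ w ∈ (List.range k).reverse.map (fun t =>
        ((n1 + ((t + 1 : Nat) : Int) * dr, n2 + ((t + 1 : Nat) : Int) * dc), v t)),
        ¬(pvPhysS sh w.1.1 w.1.2 = τ ∧ τ.isSome = true) := by
      intro w hw hcw
      obtain ⟨j, hj, rfl⟩ := List.mem_map.mp hw
      dsimp only at hcw
      exact hm' j (List.mem_range.mp (List.mem_reverse.mp hj)) hcw
    have hnoC : ∀ w ∈ (List.range k).map (fun j : Nat =>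
        ((n1 + (j : Int) * dr, n2 + (j : Int) * dc), (".":String))),
        ¬(pvPhysS sh w.1.1 w.1.2 = τ ∧ τ.isSome = true) := by
      intro w hw hcw
      obtain ⟨j, hj, rfl⟩ := List.mem_map.mp hw
      dsimp only at hcw
      by_cases hj0 : j = 0
      · subst hj0
        apply hc0
        simpa using hcw
      · obtain ⟨j', rfl⟩ : ∃ j'', j = j'' + 1 := ⟨j - 1, by omega⟩
        exact hm' j' (by have := List.mem_range.mp hj; omega) hcw
    rw [pvFind_nomatch sh τ _ _ hnoM, pvFind_nomatch sh τ _ _ hnoC,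
      pvFind_nomatch sh τ _ _ hnoB]

-- ===== VERDICT (by name: the statement is the Claim_ definition above) =====
theorem move_horizontal_spec : Claim_equal_move_horizontal := by
  intro grid pos next_pos _ hpre
  obtain ⟨k, hk, hbox, hterm, hnd⟩ := hpre
  unfold Spec_move_horizontal
  have hfuel : k < pvFuel grid := by unfold pvFuel; omega
  set dr := next_pos.1 - pos.1 with hdr
  set dc := next_pos.2 - pos.2 with hdc
  set n1 := next_pos.1 with hn1
  set n2 := next_pos.2 with hn2
  have hterm' : pvCell grid (n1 + (k : Int) * dr) (n2 + (k : Int) * dc) = some "#" ∨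
      pvCell grid (n1 + (k : Int) * dr) (n2 + (k : Int) * dc) = some "." := by
    rcases hterm with h | ⟨h, -⟩
    · exact Or.inl h
    · exact Or.inr h
  have hndI : ∀ i j : Nat, i ≤ k → j ≤ k →
      pvPhys grid (n1 + (i : Int) * dr) (n2 + (i : Int) * dc) =
        pvPhys grid (n1 + (j : Int) * dr) (n2 + (j : Int) * dc) → i = j := by
    intro i j hi hj heq
    exact List.inj_on_of_nodup_map hnd (List.mem_range.mpr (by omega))
      (List.mem_range.mpr (by omega)) heq
  have hboxV : ∀ j : Nat, j < k →
      pvCell grid (n1 + (j : Int) * dr) (n2 + (j : Int) * dc) =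
        some (pvV grid n1 n2 dr dc j) := by
    intro j hj
    rcases hbox j hj with h | h <;> rw [h] <;> simp [pvV, h]
  have hA := scanA_spec grid n1 n2 dr dc k hbox hterm' k 0 (by omega) (pvFuel grid) hfuel
  have hB := scanB_spec grid n1 n2 dr dc k hbox hterm' k 0 (by omega) (pvFuel grid) hfuel
  simp only [Nat.cast_zero, zero_mul, add_zero, Nat.zero_add] at hA hB
  simp only [move_horizontal, move_horizontal_alt]
  rw [hA, hB]
  rcases hterm with hsharp | ⟨hdot, -⟩
  · simp [hsharp]
  · have hshift := shiftB_spec grid n1 n2 dr dc k hboxV hndI k (le_refl k)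
      (pvFuel grid) hfuel grid rfl (fun j _ => rfl)
    simp only [hdot]
    simp only [String.reduceEq, if_true, if_false]
    rw [hshift]
    -- fold A's two passes into pvApply form
    have hclear : ((List.range k).map (fun j : Nat =>
          (n1 + (j : Int) * dr, (n2 + (j : Int) * dc, pvV grid n1 n2 dr dc j)))).foldl
          (fun g obj => pvSet g obj.1 obj.2.1 ".") grid =
        pvApply grid ((List.range k).map (fun j : Nat =>
          ((n1 + (j : Int) * dr, n2 + (j : Int) * dc), "."))) := by
      simp only [pvApply, List.foldl_map]
    have hmove : ∀ gg : List (List String), ((List.range k).map (fun j : Nat =>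
          (n1 + (j : Int) * dr, (n2 + (j : Int) * dc, pvV grid n1 n2 dr dc j)))).foldl
          (fun g obj => pvSet g (obj.1 + dr) (obj.2.1 + dc) obj.2.2) gg =
        pvApply gg ((List.range k).map (fun j : Nat =>
          ((n1 + ((j + 1 : Nat) : Int) * dr, n2 + ((j + 1 : Nat) : Int) * dc),
            pvV grid n1 n2 dr dc j))) := by
      intro gg
      simp only [pvApply, List.foldl_map]
      have e1 : ∀ jj : Nat, n1 + (jj : Int) * dr + dr = n1 + ((jj + 1 : Nat) : Int) * dr := by
        intro jj; push_cast; ring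
      have e2 : ∀ jj : Nat, n2 + (jj : Int) * dc + dc = n2 + ((jj + 1 : Nat) : Int) * dc := by
        intro jj; push_cast; ring
      simp only [e1, e2]
    rw [hclear, hmove]
    have hpn1 : pos.1 + dr = n1 := by rw [hdr]; ring
    have hpn2 : pos.2 + dc = n2 := by rw [hdc]; ring
    rw [hpn1, hpn2]
    refine Prod.ext ?_ rfl
    -- both grids as a single pvApply
    have hAgrid : pvSet (pvSet (pvApply (pvApply grid ((List.range k).map (fun j : Nat =>
          ((n1 + (j : Int) * dr, n2 + (j : Int) * dc), "."))))
          ((List.range k).map (fun j : Nat =>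
            ((n1 + ((j + 1 : Nat) : Int) * dr, n2 + ((j + 1 : Nat) : Int) * dc),
              pvV grid n1 n2 dr dc j)))) pos.1 pos.2 ".") n1 n2 "@" =
        pvApply grid (((List.range k).map (fun j : Nat =>
          ((n1 + (j : Int) * dr, n2 + (j : Int) * dc), "."))) ++
          (((List.range k).map (fun j : Nat =>
            ((n1 + ((j + 1 : Nat) : Int) * dr, n2 + ((j + 1 : Nat) : Int) * dc),
              pvV grid n1 n2 dr dc j))) ++
          [((pos.1, pos.2), "."), ((n1, n2), "@")])) := by
      rw [pvApply_append, pvApply_append]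
      rfl
    have hBgrid : pvSet (pvSet (pvApply grid ((List.range k).reverse.map (fun t : Nat =>
          ((n1 + ((t + 1 : Nat) : Int) * dr, n2 + ((t + 1 : Nat) : Int) * dc),
            pvV grid n1 n2 dr dc t)))) pos.1 pos.2 ".") n1 n2 "@" =
        pvApply grid (((List.range k).reverse.map (fun t : Nat =>
          ((n1 + ((t + 1 : Nat) : Int) * dr, n2 + ((t + 1 : Nat) : Int) * dc),
            pvV grid n1 n2 dr dc t))) ++
          [((pos.1, pos.2), "."), ((n1, n2), "@")]) := by
      rw [pvApply_append]
      rfl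
    rw [hAgrid, hBgrid]
    apply pvGrid_ext
    · rw [pvShape_apply, pvShape_apply]
    · intro i j
      rw [pvCell_apply, pvCell_apply]
      rw [pvFind_append, pvFind_append, pvFind_append]
      simp only [pvFind, List.foldl_cons, List.foldl_nil]
      by_cases hat : pvPhysS (pvShape grid) ((n1, n2) : Int × Int).1 ((n1, n2) : Int × Int).2 =
          pvPhys grid (i : Int) (j : Int) ∧ (pvPhys grid (i : Int) (j : Int)).isSome = true
      · rw [if_pos hat, if_pos hat]
      · rw [if_neg hat, if_neg hat]
        by_cases hpos : pvPhysS (pvShape grid) ((pos.1, pos.2) : Int × Int).1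
            ((pos.1, pos.2) : Int × Int).2 = pvPhys grid (i : Int) (j : Int) ∧
            (pvPhys grid (i : Int) (j : Int)).isSome = true
        · rw [if_pos hpos, if_pos hpos]
        · rw [if_neg hpos, if_neg hpos]
          exact pvFind_AB (pvShape grid) n1 n2 dr dc (pvV grid n1 n2 dr dc) k hndI
            (pvPhys grid (i : Int) (j : Int)) _ (by simpa using hat)
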